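-- pv_equiv track=rewrite | github.com/arturkam25/Codify | app/services/socrates_handler.py | check_socrates_response
-- ===== SOURCE A (Python) =====
-- def check_socrates_response(user_message, conversation_messages):
--     """
--     Checks if user has said 'nie wiem' three times in a row.
--     Returns True if we should give direct answer, False if we should ask questions.
--     """
--     # Include current message in check
--     all_messages = conversation_messages + [{"role": "user", "content": user_message}]
--
--     # Look at last few messages to count "nie wiem"
--     recent_messages = all_messages[-6:] if len(all_messages) > 6 else all_messages
--
--     # Count consecutive "nie wiem" from the end
--     count = 0
--     for msg in reversed(recent_messages):
--         if msg["role"] == "user":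
--             content_lower = msg["content"].lower().strip()
--             # Check for variations of "nie wiem"
--             if any(phrase in content_lower for phrase in ["nie wiem", "nie wiem.", "nie wiem!", "nie wiem?", "dont know", "i don't know", "nie wiem,"]):
--                 count += 1
--             else:
--                 break  # Break on first non-"nie wiem" message
--
--     return count >= 3
-- ===== SOURCE B (Python) =====
-- PHRASES = ["nie wiem", "nie wiem.", "nie wiem!", "nie wiem?", "dont know", "i don't know", "nie wiem,"]
--
--
-- def check_socrates_response(user_message, conversation_messages):
--     # Last 6 messages including the current one ([-6:] already clamps, no length test needed)
--     msgs = (conversation_messages + [{"role": "user", "content": user_message}])[-6:]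
--     # Single FORWARD pass: run-length of consecutive "nie wiem"-like user messages,
--     # reset to 0 on a non-matching user message; non-user messages leave the run alone.
--     run = 0
--     for m in msgs:
--         if m.get("role") == "user":
--             content = m.get("content", "").lower().strip()
--             run = run + 1 if any(p in content for p in PHRASES) else 0
--     return run >= 3
-- ===== Notes on version B (the rewrite author's own statement) =====
-- stated objective: alternative
-- what changed: Replaces A's reversed scan with a break by a single forward pass keeping a run-length accumulator that resets on a non-matching user message (no reversal, no break), uses dict.get so missing keys never raise, and drops the redundant length>6 test since [-6:] already clamps.
import Mathlib
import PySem

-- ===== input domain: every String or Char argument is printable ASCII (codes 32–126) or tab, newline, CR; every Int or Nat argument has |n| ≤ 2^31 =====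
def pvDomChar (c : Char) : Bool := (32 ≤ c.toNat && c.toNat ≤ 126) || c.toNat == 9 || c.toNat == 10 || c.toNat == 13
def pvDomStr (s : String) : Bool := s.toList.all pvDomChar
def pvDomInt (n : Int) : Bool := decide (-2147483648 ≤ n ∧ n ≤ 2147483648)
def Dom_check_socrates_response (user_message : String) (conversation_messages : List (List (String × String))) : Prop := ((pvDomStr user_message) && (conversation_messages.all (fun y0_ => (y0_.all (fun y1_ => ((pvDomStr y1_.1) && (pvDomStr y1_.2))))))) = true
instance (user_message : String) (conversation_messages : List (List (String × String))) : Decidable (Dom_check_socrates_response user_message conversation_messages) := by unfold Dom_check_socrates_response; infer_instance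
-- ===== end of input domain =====

-- B replaces A's reversed scan-with-break by one forward pass keeping a resetting run-length accumulator; objective: alternative.

-- ===== PORT A =====
def pvPhrases : List String :=
  ["nie wiem", "nie wiem.", "nie wiem!", "nie wiem?", "dont know", "i don't know", "nie wiem,"]

def pvCurrent (user_message : String) : List (String × String) :=
  [("role", "user"), ("content", user_message)]

-- the 'for msg in reversed(recent_messages)' loop with its break; getD "" stands for
-- msg["role"] / msg["content"], whose KeyError case is excluded by Pre_
def pvLoopA : List (List (String × String)) → Int → Int
  | [], count => count
  | m :: rest, count =>
    if (PySem.Dict.mk m).getD "role" "" == "user" then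
      let content_lower := PySem.Str.strip (PySem.Str.lower ((PySem.Dict.mk m).getD "content" ""))
      if pvPhrases.any (fun phrase => PySem.Str.isIn phrase content_lower) then
        pvLoopA rest (count + 1)
      else count
    else pvLoopA rest count

def check_socrates_response (user_message : String) (conversation_messages : List (List (String × String))) : Bool :=
  let all_messages := conversation_messages ++ [pvCurrent user_message]
  let recent_messages :=
    if all_messages.length > 6 then PySem.List.slice all_messages (some (-6)) none else all_messages
  decide (3 ≤ pvLoopA recent_messages.reverse 0)

-- ===== PORT B =====
def pvMatches (content : String) : Bool :=
  pvPhrases.any (fun phrase => PySem.Str.isIn phrase content)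

-- body of B's forward 'for m in msgs' loop, applied via foldl over the run accumulator;
-- getD "" stands for m.get(...): "" ≠ "user" mirrors None ≠ "user", and "" matches no phrase
def pvStep (run : Int) (m : List (String × String)) : Int :=
  if (PySem.Dict.mk m).getD "role" "" == "user" then
    (if pvMatches (PySem.Str.strip (PySem.Str.lower ((PySem.Dict.mk m).getD "content" ""))) then run + 1 else 0)
  else run

def check_socrates_response_alt (user_message : String) (conversation_messages : List (List (String × String))) : Bool :=
  let msgs := PySem.List.slice (conversation_messages ++ [pvCurrent user_message]) (some (-6)) none
  decide (3 ≤ msgs.foldl pvStep 0)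

-- ===== PRECONDITION & SPEC =====
-- Pre_ excludes inputs where the current message matches a phrase AND some dict in the last-6
-- window (the last 5 of conversation_messages) lacks a "role"/"content" key: A's scan can then
-- reach the keyless dict and raise KeyError (when its break stops first A still returns, and B
-- returns the same value there); when the current message does not match, A breaks at once and
-- never touches the dicts.
def Pre_check_socrates_response (user_message : String) (conversation_messages : List (List (String × String))) : Prop :=
  pvMatches (PySem.Str.strip (PySem.Str.lower user_message)) = false ∨
  (conversation_messages.drop (conversation_messages.length - 5)).all
    (fun m => (PySem.Dict.mk m).contains "role" && (PySem.Dict.mk m).contains "content") = true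

instance (user_message : String) (conversation_messages : List (List (String × String))) : Decidable (Pre_check_socrates_response user_message conversation_messages) := by
  unfold Pre_check_socrates_response; infer_instance

def pvWitness_check_socrates_response : String × (List (List (String × String))) :=
  ("nie wiem", [[("role", "user"), ("content", "Nie wiem ")], [("role", "assistant"), ("content", "ok")], [("role", "user"), ("content", "nie wiem!")]])

def Spec_check_socrates_response (user_message : String) (conversation_messages : List (List (String × String))) (out : Bool) : Prop := out = check_socrates_response_alt user_message conversation_messages
instance (user_message : String) (conversation_messages : List (List (String × String))) (out : Bool) : Decidable (Spec_check_socrates_response user_message conversation_messages out) := by unfold Spec_check_socrates_response; infer_instance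

-- ===== CLAIM (what is proved, stated in full; the proofs are below) =====
def Claim_equal_check_socrates_response : Prop := ∀ (user_message : String) (conversation_messages : List (List (String × String))), Dom_check_socrates_response user_message conversation_messages → Pre_check_socrates_response user_message conversation_messages → Spec_check_socrates_response user_message conversation_messages (check_socrates_response user_message conversation_messages)

-- ===== LEMMAS AND PROOFS =====

-- proof-only: the trailing-run count both programs effectively compute, as a leading run of a list
def pvLead : List String → Int
  | [] => 0
  | content :: rest => if pvMatches content then 1 + pvLead rest else 0

def pvProj (l : List (List (String × String))) : List String :=
  l.filterMap (fun m =>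
    if (PySem.Dict.mk m).getD "role" "" == "user" then
      some (PySem.Str.strip (PySem.Str.lower ((PySem.Dict.mk m).getD "content" "")))
    else none)

-- A's break-loop over a list equals the count of its leading filtered matches, shifted by the accumulator
theorem pvLoopA_eq_lead (l : List (List (String × String))) (c : Int) :
    pvLoopA l c = c + pvLead (pvProj l) := by
  induction l generalizing c with
  | nil => simp [pvLoopA, pvLead, pvProj]
  | cons m rest ih =>
    by_cases hr : ((PySem.Dict.mk m).getD "role" "" == "user") = true
    · simp only [pvLoopA, pvProj, List.filterMap_cons, hr, if_pos]
      by_cases hm : pvMatches (PySem.Str.strip (PySem.Str.lower ((PySem.Dict.mk m).getD "content" ""))) = true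
      · rw [if_pos (by simpa [pvMatches] using hm), ih]
        simp [pvLead, pvProj, hm]; omega
      · rw [if_neg (by simpa [pvMatches] using hm)]
        simp [pvLead, pvProj, hm]
    · simp only [pvLoopA, pvProj, List.filterMap_cons, hr, if_neg, Bool.not_eq_true] at *
      simp [ih, pvProj]

-- unfolding pvProj one message at a time
theorem pvProj_cons (m : List (String × String)) (rest : List (List (String × String))) :
    pvProj (m :: rest) =
      if (PySem.Dict.mk m).getD "role" "" == "user" then
        PySem.Str.strip (PySem.Str.lower ((PySem.Dict.mk m).getD "content" "")) :: pvProj rest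
      else pvProj rest := by
  by_cases hr : ((PySem.Dict.mk m).getD "role" "" == "user") = true <;>
    simp only [beq_iff_eq] at hr <;> simp [pvProj, List.filterMap_cons, hr]

-- B's forward fold skips non-user entries, so it folds the projected contents
theorem foldl_pvStep_eq_proj (l : List (List (String × String))) (r : Int) :
    l.foldl pvStep r = (pvProj l).foldl (fun run c => if pvMatches c then run + 1 else 0) r := by
  induction l generalizing r with
  | nil => simp [pvProj]
  | cons m rest ih =>
    rw [List.foldl_cons, ih, pvProj_cons]
    by_cases hr : ((PySem.Dict.mk m).getD "role" "" == "user") = true <;>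
      simp [pvStep, hr]

-- the resetting forward fold from 0 computes the trailing run = leading run of the reverse
theorem foldl_reset_eq_lead_reverse (f : List String) :
    f.foldl (fun run c => if pvMatches c then run + 1 else 0) 0 = pvLead f.reverse := by
  induction f using List.reverseRecOn with
  | nil => simp [pvLead]
  | append_singleton l x ih =>
    rw [List.foldl_append, List.reverse_append]
    by_cases hm : pvMatches x = true
    · simp [pvLead, hm, ih]; omega
    · simp [pvLead, hm]

-- the length>6 branch is redundant: [-6:] on a list of length ≤ 6 is the list itself
theorem pvSlice_recent (xs : List (List (String × String))) :
    (if xs.length > 6 then PySem.List.slice xs (some (-6)) none else xs)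
      = PySem.List.slice xs (some (-6)) none := by
  split_ifs with h
  · rfl
  · rw [PySem.List.slice_from_neg_ofNat xs 6 (by omega)]
    have h0 : xs.length - 6 = 0 := by omega
    simp [h0]

-- ===== VERDICT (by name: the statement is the Claim_ definition above) =====
theorem check_socrates_response_spec : Claim_equal_check_socrates_response := by
  intro user_message conversation_messages _ _
  unfold Spec_check_socrates_response check_socrates_response check_socrates_response_alt
  dsimp only
  rw [pvSlice_recent, pvLoopA_eq_lead, foldl_pvStep_eq_proj, foldl_reset_eq_lead_reverse]
  have : pvProj ((conversation_messages ++ [pvCurrent user_message]).reverse :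
      List (List (String × String))).reverse
      = pvProj (conversation_messages ++ [pvCurrent user_message]) := by simp
  simp [pvProj, List.filterMap_reverse]
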